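-- pv_equiv track=rewrite | github.com/dalehagglund/everybody-codes-2025 | ec01/ec01.py | part3
-- ===== SOURCE A (Python) =====
-- def part3(names, instructions):
--     names = names[:]
--     def swap(pos):
--         names[0], names[pos] = names[pos], names[0]
--     for dir, n in instructions:
--         if dir == "L": swap(-n % len(names))
--         elif dir == "R": swap(n % len(names))
--     return names[0]
-- ===== SOURCE B (Python) =====
-- def part3(names, instructions):
--     p = 0
--     for dir, n in reversed(instructions):
--         if dir == "L":
--             pos = -n % len(names)
--         elif dir == "R":
--             pos = n % len(names)
--         else:
--             continue
--         if p == 0: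
--             p = pos
--         elif p == pos:
--             p = 0
--     return names[p]
-- ===== Notes on version B (the rewrite author's own statement) =====
-- stated objective: alternative
-- what changed: Instead of simulating every swap on a copy of the list, B traces the final position of slot 0 backward through the instructions (each swap is the transposition (0,pos), so the pre-image of 0 is tracked with one integer) and indexes the original list once; Pre_ excludes the empty names list, on which A raises (ZeroDivisionError or IndexError).
import Mathlib
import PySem

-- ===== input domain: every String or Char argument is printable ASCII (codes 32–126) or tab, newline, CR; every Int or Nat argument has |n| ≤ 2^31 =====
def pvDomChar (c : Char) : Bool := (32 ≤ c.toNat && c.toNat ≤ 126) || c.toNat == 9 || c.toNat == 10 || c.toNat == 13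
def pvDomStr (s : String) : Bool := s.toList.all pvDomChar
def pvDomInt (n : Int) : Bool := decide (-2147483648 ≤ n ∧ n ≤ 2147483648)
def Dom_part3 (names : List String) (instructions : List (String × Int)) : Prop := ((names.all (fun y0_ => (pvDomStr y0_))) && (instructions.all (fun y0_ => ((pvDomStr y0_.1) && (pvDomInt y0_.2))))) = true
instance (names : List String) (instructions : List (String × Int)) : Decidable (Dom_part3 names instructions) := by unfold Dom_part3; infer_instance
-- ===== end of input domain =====

-- B traces the final position of slot 0 backward through the instructions with one integer
-- instead of simulating every swap on a copy of the list (alternative decomposition).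


-- ===== PORT A =====
-- names[0], names[pos] = names[pos], names[0]
def pvSwap (l : List String) (pos : Int) : List String :=
  let a := PySem.List.pyGetD l pos ""
  let b := PySem.List.pyGetD l 0 ""
  PySem.List.pySetD (PySem.List.pySetD l 0 a) pos b

def pvStepA (l : List String) (ins : String × Int) : List String :=
  if ins.1 == "L" then pvSwap l (PySem.Int.mod (-ins.2) (PySem.List.len l))
  else if ins.1 == "R" then pvSwap l (PySem.Int.mod ins.2 (PySem.List.len l))
  else l

def part3 (names : List String) (instructions : List (String × Int)) : String :=
  PySem.List.pyGetD (instructions.foldl pvStepA names) 0 ""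

-- ===== PORT B =====
-- backward update of the tracked position p across one instruction
def pvUpd (p pos : Int) : Int :=
  if p == 0 then pos else if p == pos then 0 else p

def pvBack (L : Int) (p : Int) (ins : String × Int) : Int :=
  if ins.1 == "L" then pvUpd p (PySem.Int.mod (-ins.2) L)
  else if ins.1 == "R" then pvUpd p (PySem.Int.mod ins.2 L)
  else p

def part3_alt (names : List String) (instructions : List (String × Int)) : String :=
  PySem.List.pyGetD names
    (instructions.reverse.foldl (pvBack (PySem.List.len names)) 0) ""

-- ===== PRECONDITION & SPEC =====
-- Pre_ excludes the empty names list, on which A raises (ZeroDivisionError if an L/R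
-- instruction is present, IndexError otherwise); A never returns there.
def Pre_part3 (names : List String) (instructions : List (String × Int)) : Prop := names ≠ []
instance (names : List String) (instructions : List (String × Int)) : Decidable (Pre_part3 names instructions) := by unfold Pre_part3; infer_instance

def pvWitness_part3 : List String × (List (String × Int)) := (["a", "b", "c"], [("L", 1), ("R", 5), ("x", 0)])

def Spec_part3 (names : List String) (instructions : List (String × Int)) (out : String) : Prop := out = part3_alt names instructions
instance (names : List String) (instructions : List (String × Int)) (out : String) : Decidable (Spec_part3 names instructions out) := by unfold Spec_part3; infer_instance

-- ===== CLAIM (what is proved, stated in full; the proofs are below) =====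
def Claim_equal_part3 : Prop := ∀ (names : List String) (instructions : List (String × Int)), Dom_part3 names instructions → Pre_part3 names instructions → Spec_part3 names instructions (part3 names instructions)

-- ===== LEMMAS AND PROOFS =====

lemma pvSwap_length (l : List String) (pos : Int) : (pvSwap l pos).length = l.length := by
  simp [pvSwap, PySem.List.length_pySetD]

lemma pvStepA_length (l : List String) (ins : String × Int) :
    (pvStepA l ins).length = l.length := by
  unfold pvStepA; split_ifs <;> simp [pvSwap_length]

-- reading the swapped list at q equals reading the original at the backward-updated index
lemma pvSwap_get (l : List String) (pos q : Int)
    (hpos0 : 0 ≤ pos) (hposl : pos < (l.length : Int))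
    (hq0 : 0 ≤ q) (hql : q < (l.length : Int)) :
    PySem.List.pyGetD (pvSwap l pos) q "" = PySem.List.pyGetD l (pvUpd q pos) "" := by
  have hlen : (pvSwap l pos).length = l.length := pvSwap_length l pos
  simp only [pvSwap, pvUpd]
  rw [PySem.List.pySetD_of_nonneg _ _ (by omega : (0:Int) ≤ 0), PySem.List.pySetD_of_nonneg _ _ hpos0]
  rw [PySem.List.pyGetD_eq_getElem _ _ hq0 (by simpa using hql)]
  have hq : q.toNat < l.length := by omega
  have hp : pos.toNat < l.length := by omega
  simp only [List.getElem_set]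
  by_cases h0 : q = 0
  · subst h0
    by_cases hpz : pos = 0
    · subst hpz
      simp [PySem.List.pyGetD_eq_getElem _ _ (le_refl 0) (by omega)]
    · have : pos.toNat ≠ 0 := by omega
      simp [this, PySem.List.pyGetD_eq_getElem _ _ hpos0 (by omega : pos < (l.length : Int))]
  · by_cases hqp : q = pos
    · subst hqp
      simp [beq_iff_eq, h0]
    · have h1 : pos.toNat ≠ q.toNat := by omega
      have h2 : (0:Nat) ≠ q.toNat := by omega
      simp [beq_iff_eq, h0, hqp, h1, h2,
        PySem.List.pyGetD_eq_getElem _ _ hq0 hql]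

lemma pvStepA_get (l : List String) (ins : String × Int) (q : Int)
    (hne : l ≠ []) (hq0 : 0 ≤ q) (hql : q < (l.length : Int)) :
    PySem.List.pyGetD (pvStepA l ins) q "" =
      PySem.List.pyGetD l (pvBack (PySem.List.len l) q ins) "" := by
  have hlpos : (0:Int) < (l.length : Int) := by
    have := List.length_pos_iff.mpr hne; exact_mod_cast this
  unfold pvStepA pvBack
  simp only [PySem.List.len_eq]
  split_ifs with h1 h2
  · exact pvSwap_get l _ q (PySem.Int.mod_nonneg _ hlpos) (PySem.Int.mod_lt _ hlpos) hq0 hql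
  · exact pvSwap_get l _ q (PySem.Int.mod_nonneg _ hlpos) (PySem.Int.mod_lt _ hlpos) hq0 hql
  · rfl

lemma pvUpd_range (p pos L : Int) (hp : 0 ≤ p ∧ p < L) (hpos : 0 ≤ pos ∧ pos < L) (hL : 0 < L) :
    0 ≤ pvUpd p pos ∧ pvUpd p pos < L := by
  unfold pvUpd; split_ifs <;> omega

lemma pvBack_range (L p : Int) (ins : String × Int) (hL : 0 < L) (hp : 0 ≤ p ∧ p < L) :
    0 ≤ pvBack L p ins ∧ pvBack L p ins < L := by
  unfold pvBack
  split_ifs with h1 h2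
  · exact pvUpd_range _ _ _ hp ⟨PySem.Int.mod_nonneg _ hL, PySem.Int.mod_lt _ hL⟩ hL
  · exact pvUpd_range _ _ _ hp ⟨PySem.Int.mod_nonneg _ hL, PySem.Int.mod_lt _ hL⟩ hL
  · exact hp

lemma pvTrace_range (L : Int) (hL : 0 < L) (ins : List (String × Int)) (p : Int)
    (hp : 0 ≤ p ∧ p < L) :
    0 ≤ ins.foldr (fun x acc => pvBack L acc x) p ∧
      ins.foldr (fun x acc => pvBack L acc x) p < L := by
  induction ins with
  | nil => exact hp
  | cons x rest ih => exact pvBack_range L _ x hL ih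

-- main invariant: reading A's fold at p equals reading the start list at the back-trace of p
lemma pvMain : ∀ (ins : List (String × Int)) (l : List String) (p : Int),
    l ≠ [] → 0 ≤ p → p < (l.length : Int) →
    PySem.List.pyGetD (ins.foldl pvStepA l) p "" =
      PySem.List.pyGetD l (ins.foldr (fun x acc => pvBack (l.length : Int) acc x) p) "" := by
  intro ins
  induction ins with
  | nil => intro l p _ _ _; rfl
  | cons x rest ih =>
    intro l p hne hp0 hpl
    have hlen : (pvStepA l x).length = l.length := pvStepA_length l x
    have hne' : pvStepA l x ≠ [] := by
      intro h; have := congrArg List.length h; simp [hlen] at this; exact hne this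
    have hLpos : (0:Int) < (l.length : Int) := by
      have := List.length_pos_iff.mpr hne; exact_mod_cast this
    simp only [List.foldl_cons, List.foldr_cons]
    rw [ih (pvStepA l x) p hne' hp0 (by rw [hlen]; exact hpl)]
    rw [hlen]
    have hq := pvTrace_range (l.length : Int) hLpos rest p ⟨hp0, hpl⟩
    have := pvStepA_get l x (rest.foldr (fun x acc => pvBack (l.length : Int) acc x) p)
      hne hq.1 hq.2
    simpa [PySem.List.len_eq] using this

-- ===== VERDICT (by name: the statement is the Claim_ definition above) =====
theorem part3_spec : Claim_equal_part3 := by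
  intro names instructions _ hpre
  unfold Spec_part3 part3 part3_alt
  rw [List.foldl_reverse]
  have hLpos : (0:Int) < (names.length : Int) := by
    have := List.length_pos_iff.mpr hpre; exact_mod_cast this
  have := pvMain instructions names 0 hpre le_rfl hLpos
  simpa [PySem.List.len_eq] using this
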